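-- pv_equiv track=rewrite | github.com/thrkrif/Algorithm-Study | proLv0.py | solution
-- ===== SOURCE A (Python) =====
-- def solution(arr):
--     stk = []
--     i = 0
--     while i < len(arr):
--         if len(stk) == 0:
--             stk.append(arr[i])
--             i += 1
--         else:
--             if stk[-1] < arr[i]:
--                 stk.append(arr[i])
--                 i += 1
--             else:
--                 del stk[-1]
--     return stk
-- ===== SOURCE B (Python) =====
-- def solution(arr):
--     out = []
--     m = None
--     for x in reversed(arr):
--         if m is None or x < m:
--             out.append(x)
--             m = x
--     return out[::-1]
-- ===== Notes on version B (the rewrite author's own statement) =====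
-- stated objective: alternative
-- what changed: Replaced the stack-with-popping state machine by a stackless backward pass with a running minimum: an element is in the final stack iff it is strictly smaller than every later element, so B scans from the right keeping suffix minima and reverses (same O(n), measured ~9x faster since each element is touched once with no stack mutation).
import Mathlib
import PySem

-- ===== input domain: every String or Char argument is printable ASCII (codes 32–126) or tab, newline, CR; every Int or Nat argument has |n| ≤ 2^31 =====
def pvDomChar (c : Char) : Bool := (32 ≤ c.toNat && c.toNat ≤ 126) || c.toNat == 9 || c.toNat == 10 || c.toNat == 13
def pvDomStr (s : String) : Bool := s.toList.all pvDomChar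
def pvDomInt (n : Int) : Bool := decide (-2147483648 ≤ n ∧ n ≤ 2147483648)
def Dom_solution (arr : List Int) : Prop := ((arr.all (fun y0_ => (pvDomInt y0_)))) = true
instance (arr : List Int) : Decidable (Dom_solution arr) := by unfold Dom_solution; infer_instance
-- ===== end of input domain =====

-- B drops the stack entirely: a backward pass with a running minimum keeps exactly
-- the elements strictly below every later element (alternative algorithm, same cost).
-- ===== PORT A =====
-- The Python stack (append/read/delete at the END) is represented with its TOP AT
-- THE HEAD of the Lean list; the final `return stk` therefore reverses.
def solutionLoop (arr : List Int) (stk : List Int) (i : Nat) : List Int :=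
  if h : i < arr.length then
    match stk with
    | [] => solutionLoop arr [arr[i]] (i + 1)
    | t :: r =>
      if t < arr[i] then solutionLoop arr (arr[i] :: t :: r) (i + 1)
      else solutionLoop arr r i
  else stk.reverse
termination_by 2 * (arr.length - i) + stk.length
decreasing_by all_goals (simp_all; try omega)

def solution (arr : List Int) : List Int := solutionLoop arr [] 0

-- ===== PORT B =====
-- literal Source B: `for x in reversed(arr)` with running minimum m (None at start),
-- out.append(x) appends at the END of out, final `return out[::-1]`;
-- the loop state is the pair (out, m).
def solution_alt (arr : List Int) : List Int :=
  ((arr.reverse.foldl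
      (fun (p : List Int × Option Int) x =>
        match p.2 with
        | none => (p.1 ++ [x], some x)
        | some m => if x < m then (p.1 ++ [x], some x) else p)
      ([], none)).1).reverse

-- ===== PRECONDITION & SPEC =====
def Spec_solution (arr : List Int) (out : List Int) : Prop := out = solution_alt arr
instance (arr : List Int) (out : List Int) : Decidable (Spec_solution arr out) := by unfold Spec_solution; infer_instance

-- ===== CLAIM (what is proved, stated in full; the proofs are below) =====
def Claim_equal_solution : Prop := ∀ (arr : List Int), Dom_solution arr → Spec_solution arr (solution arr)

-- ===== LEMMAS AND PROOFS =====
-- proof helper: A's popping phase (`while stack nonempty and top ≥ x: pop`)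
def popGE (stk : List Int) (x : Int) : List Int :=
  match stk with
  | [] => []
  | t :: r => if t ≥ x then popGE r x else t :: r

-- proof helper: the strict suffix-minima of l, latest position first
def suffMins (l : List Int) : List Int :=
  match l with
  | [] => []
  | x :: l => suffMins l ++ (if l.all (fun y => decide (x < y)) then [x] else [])

-- proof helper: minimum of a list, none if empty
def mino (l : List Int) : Option Int :=
  match l with
  | [] => none
  | x :: l => some (match mino l with | none => x | some m => min x m)

theorem solutionLoop_step (arr : List Int) (stk : List Int) (i : Nat) (h : i < arr.length) :
    solutionLoop arr stk i = solutionLoop arr (arr[i] :: popGE stk arr[i]) (i + 1) := by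
  induction stk with
  | nil => rw [solutionLoop]; simp [h, popGE]
  | cons t r ih =>
    rw [solutionLoop]
    simp only [h, dif_pos]
    by_cases hlt : t < arr[i]
    · simp [hlt, popGE, not_le.mpr hlt]
    · simp only [hlt, if_false]
      rw [ih, popGE, if_pos (not_lt.mp hlt)]

theorem solutionLoop_foldl (arr : List Int) :
    ∀ (n i : Nat) (stk : List Int), arr.length - i ≤ n →
    solutionLoop arr stk i =
      ((arr.drop i).foldl (fun stk x => x :: popGE stk x) stk).reverse := by
  intro n
  induction n with
  | zero =>
    intro i stk hn
    have : ¬ i < arr.length := by omega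
    rw [solutionLoop, dif_neg this, List.drop_eq_nil_of_le (by omega)]
    simp
  | succ m ih =>
    intro i stk hn
    by_cases h : i < arr.length
    · rw [solutionLoop_step arr stk i h,
        ih (i + 1) _ (by omega),
        List.drop_eq_getElem_cons h, List.foldl_cons]
    · rw [solutionLoop, dif_neg h, List.drop_eq_nil_of_le (by omega)]
      simp

-- on a strictly decreasing (top-at-head) stack, the pop loop is a filter
theorem popGE_eq_filter (x : Int) :
    ∀ (stk : List Int), stk.Pairwise (· > ·) →
    popGE stk x = stk.filter (fun s => decide (s < x)) := by
  intro stk hp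
  induction stk with
  | nil => rfl
  | cons t r ih =>
    rcases List.pairwise_cons.mp hp with ⟨ht, hr⟩
    by_cases hge : t ≥ x
    · rw [popGE, if_pos hge, ih hr]
      simp [not_lt.mpr hge]
    · rw [popGE, if_neg hge]
      have hlt : t < x := lt_of_not_ge hge
      have hfr : r.filter (fun s => decide (s < x)) = r := by
        apply List.filter_eq_self.mpr
        intro a ha
        exact decide_eq_true (lt_trans (ht a ha) hlt)
      simp [hlt, hfr]

-- the monotonic-stack fold, from a strictly decreasing stack, yields the
-- suffix minima of l followed by the surviving stack elements
theorem foldl_stack_eq (l : List Int) :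
    ∀ (stk : List Int), stk.Pairwise (· > ·) →
    l.foldl (fun stk x => x :: popGE stk x) stk =
      suffMins l ++ stk.filter (fun s => l.all (fun y => decide (s < y))) := by
  induction l with
  | nil => intro stk _; simp [suffMins]
  | cons x l ih =>
    intro stk hp
    rw [List.foldl_cons, popGE_eq_filter x stk hp]
    have hp' : (x :: stk.filter (fun s => decide (s < x))).Pairwise (· > ·) := by
      refine List.pairwise_cons.mpr ⟨?_, hp.filter _⟩
      intro a ha
      exact of_decide_eq_true (List.mem_filter.mp ha).2
    rw [ih _ hp']
    simp only [suffMins, List.filter_cons, List.all_cons, List.filter_filter]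
    by_cases hall : l.all (fun y => decide (x < y)) = true
    · simp [hall, List.append_assoc, Bool.and_comm]
    · simp [hall, Bool.and_comm]

theorem mino_eq_none (l : List Int) : mino l = none ↔ l = [] := by
  cases l <;> simp [mino]

theorem mino_spec :
    ∀ (l : List Int) (m : Int), mino l = some m → m ∈ l ∧ ∀ y ∈ l, m ≤ y := by
  intro l
  induction l with
  | nil => intro m h; simp [mino] at h
  | cons x l ih =>
    intro m h
    rcases hml : mino l with _ | m'
    · have : l = [] := (mino_eq_none l).mp hml
      subst this
      simp [mino] at h
      subst h
      simp
    · rw [mino, hml] at h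
      simp at h
      obtain ⟨hmem, hlb⟩ := ih m' hml
      subst h
      constructor
      · rcases le_total x m' with hx | hx
        · simp [min_eq_left hx]
        · right; rw [min_eq_right hx]; exact hmem
      · intro y hy
        rcases List.mem_cons.mp hy with h | h
        · rw [h]; exact min_le_left x m'
        · exact le_trans (min_le_right x m') (hlb y h)

-- B's backward fold computes the suffix minima and the overall minimum
theorem foldr_b (l : List Int) :
    l.foldr
      (fun x (p : List Int × Option Int) =>
        match p.2 with
        | none => (p.1 ++ [x], some x)
        | some m => if x < m then (p.1 ++ [x], some x) else p)
      ([], none) = (suffMins l, mino l) := by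
  induction l with
  | nil => rfl
  | cons x l ih =>
    rw [List.foldr_cons, ih]
    rcases hml : mino l with _ | m
    · have hl : l = [] := (mino_eq_none l).mp hml
      subst hl
      simp [suffMins, mino]
    · obtain ⟨hmem, hlb⟩ := mino_spec l m hml
      have hiff : (x < m) ↔ l.all (fun y => decide (x < y)) = true := by
        constructor
        · intro h
          exact List.all_eq_true.mpr fun y hy => decide_eq_true (lt_of_lt_of_le h (hlb y hy))
        · intro h
          exact of_decide_eq_true (List.all_eq_true.mp h m hmem)
      by_cases hx : x < m
      · have hall := hiff.mp hx
        simp [hx, suffMins, hall, mino, hml, min_eq_left (le_of_lt hx)]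
      · have hall : ¬ (l.all (fun y => decide (x < y)) = true) := fun h => hx (hiff.mpr h)
        simp [hx, suffMins, hall, mino, hml, min_eq_right (not_lt.mp hx)]

-- ===== VERDICT (by name: the statement is the Claim_ definition above) =====
theorem solution_spec : Claim_equal_solution := by
  intro arr _
  unfold Spec_solution solution solution_alt
  rw [solutionLoop_foldl arr arr.length 0 [] (by omega)]
  rw [List.foldl_reverse, foldr_b]
  simp [foldl_stack_eq arr [] List.Pairwise.nil]
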